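-- pv_equiv track=rewrite | github.com/pat-ch0/bulk-python | TD5/Exo_SAT.py | evaluate_all_assignments
-- ===== SOURCE A (Python) =====
-- def variable_of_literal(literal):
--     """Returns the name of the variable of the literal."""
--     if literal[0] == '-':
--         return literal[1:len(literal)]
--     else:
--         return literal
--
-- def construct_dictionary_from_vars(set_of_vars):
--     """Constructs a dictionary from the set of variables.
--     The value of each entry is None (no assignment)."""
--     dico ={}
--     for var in set_of_vars:
--         dico[var] = None
--     return dico
--
-- def boolean_value_of_literal(assignment, literal):
--     """Given an assignment and a literal, returns the Boolean value of the
--        literal."""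
--     if literal[0] == '-':
--         return not(assignment[variable_of_literal(literal)])
--     else :
--         return assignment[variable_of_literal(literal)]
--
-- def boolean_value_of_clause(assignment, clause):
--     """Given an assignment and a clause, returns the Boolean value of the
--        clause."""
--     for literal in clause:
--         if boolean_value_of_literal(assignment,literal):
--             return True
--     return False
--
-- def number_of_true_clauses(assignment, formula):
--     """Given an assignment and a formula, returns the number of clauses having
--        a Boolean value True."""
--     compteur = 0
--     for clause in formula:
--         if boolean_value_of_clause(assignment,clause):
--             compteur += 1
--     return compteur
--
-- def iter_toutes_les_listes_binaires(n):
--     """Itérateur produisant toutes les listes de {0, 1} de taille n."""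
--     l = [0]*n
--     yield l
--     while l != [1]*n:
--         pos = n-1
--         verif = True
--         while verif:
--             if l[pos] == 0:
--                 l[pos] = 1
--                 verif = False
--             else:
--                 l[pos] = 0
--                 pos = pos-1
--         yield l
--
-- def iter_all_assignments(d):
--     """An iterator to generate all the possible assignments of a dictionary d.
--     NB: the call returns an iterator of assignments, not the assignments."""
--     key = []
--     for i in d.keys():
--         key.append(i)
--     it = iter_toutes_les_listes_binaires(len(key))
--     for i in it:
--         dico = {}
--         for j in range(len(key)):
--             if i[j] == 1:
--                 dico[key[j]] = True
--             else:
--                 dico[key[j]] = False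
--         yield dico
--
-- def evaluate_all_assignments(formula):
--     """Returns, for each possible assignment of the variables of the formula,
--     the list of the number of satisfied clauses (with Boolean value True)."""
--     l = []
--     literalName = []
--     for cause in formula:
--         for literal in cause:
--             literalName.append(variable_of_literal(literal))
--     dico = construct_dictionary_from_vars(literalName)
--     it = iter_all_assignments(dico)
--     for i in it:
--         l.append(number_of_true_clauses(i,formula))
--     return l
-- ===== SOURCE B (Python) =====
-- def evaluate_all_assignments(formula):
--     """Bitmask compilation: each clause becomes a (pos, neg) pair of variable
--     bitmasks, and each assignment is an integer counter; same output order as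
--     the original (variables in first-occurrence order, binary counting)."""
--     vars_order = []
--     seen = set()
--     for clause in formula:
--         for lit in clause:
--             v = lit[1:] if lit[0] == '-' else lit
--             if v not in seen:
--                 seen.add(v)
--                 vars_order.append(v)
--     n = len(vars_order)
--     bit = {}
--     for j in range(n):
--         bit[vars_order[n - 1 - j]] = 1 << j
--     compiled = []
--     for clause in formula:
--         pos = 0
--         neg = 0
--         for lit in clause:
--             if lit[0] == '-':
--                 neg |= bit[lit[1:]]
--             else:
--                 pos |= bit[lit]
--         compiled.append((pos, neg))
--     full = (1 << n) - 1
--     out = []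
--     for m in range(1 << n):
--         notm = full ^ m
--         cnt = 0
--         for pos, neg in compiled:
--             if (m & pos) or (notm & neg):
--                 cnt += 1
--         out.append(cnt)
--     return out
-- ===== Notes on version B (the rewrite author's own statement) =====
-- stated objective: faster
-- what changed: Instead of building a fresh variable->bool dictionary for every assignment and re-evaluating each clause by dictionary lookups, B compiles each clause once into a pair of bitmasks (positive/negative variables) and enumerates assignments as integers, deciding each clause with two bitwise AND operations.
import Mathlib
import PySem

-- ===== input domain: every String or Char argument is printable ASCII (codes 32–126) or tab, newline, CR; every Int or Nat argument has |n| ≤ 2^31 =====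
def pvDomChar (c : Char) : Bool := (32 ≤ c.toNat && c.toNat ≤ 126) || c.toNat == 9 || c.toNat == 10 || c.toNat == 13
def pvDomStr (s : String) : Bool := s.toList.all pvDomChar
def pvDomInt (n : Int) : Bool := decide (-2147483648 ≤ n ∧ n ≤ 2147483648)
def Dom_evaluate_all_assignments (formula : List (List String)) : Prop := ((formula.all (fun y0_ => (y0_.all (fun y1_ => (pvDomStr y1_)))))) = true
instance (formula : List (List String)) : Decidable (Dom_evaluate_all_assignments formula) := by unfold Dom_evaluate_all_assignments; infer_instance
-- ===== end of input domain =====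

-- B replaces A's per-assignment dictionary construction and dict-lookup clause evaluation
-- by clauses compiled once into (positive, negative) variable bitmasks and an integer
-- counter enumerating the assignments; same return value, fewer operations per assignment.


-- ===== PORT A =====
def variable_of_literal (lit : String) : String :=
  if PySem.Str.pyGet? lit 0 = some '-' then
    PySem.Str.slice lit (some 1) (some (PySem.Str.len lit))
  else lit

def construct_dictionary_from_vars (vs : List String) : PySem.Dict String (Option Bool) :=
  vs.foldl (fun d v => d.insert v none) PySem.Dict.empty

def boolean_value_of_literal (assignment : PySem.Dict String Bool) (lit : String) : Bool :=
  if PySem.Str.pyGet? lit 0 = some '-' then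
    !(assignment.getD (variable_of_literal lit) false)
  else
    assignment.getD (variable_of_literal lit) false

def boolean_value_of_clause (assignment : PySem.Dict String Bool) (clause : List String) : Bool :=
  clause.any (fun lit => boolean_value_of_literal assignment lit)

def number_of_true_clauses (assignment : PySem.Dict String Bool) (formula : List (List String)) : Int :=
  formula.foldl (fun compteur clause =>
    if boolean_value_of_clause assignment clause then compteur + 1 else compteur) 0

def incrRev : List Nat → List Nat
  | [] => []
  | 0 :: t => 1 :: t
  | _ :: t => 0 :: incrRev t

def incr (l : List Nat) : List Nat := (incrRev l.reverse).reverse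

def genBin (n : Nat) : Nat → List Nat → List (List Nat)
  | fuel, l =>
    l :: (if l = List.replicate n 1 then []
          else match fuel with
               | 0 => []
               | f + 1 => genBin n f (incr l))

def assignment_of_list (key : List String) (i : List Nat) : PySem.Dict String Bool :=
  (List.range key.length).foldl (fun d j =>
    if i.getD j 0 = 1 then d.insert (key.getD j "") true
    else d.insert (key.getD j "") false) PySem.Dict.empty

def evaluate_all_assignments (formula : List (List String)) : List Int :=
  let literalName := formula.foldl (fun acc clause =>
    clause.foldl (fun acc2 lit => acc2 ++ [variable_of_literal lit]) acc) []
  let dico := construct_dictionary_from_vars literalName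
  let key := dico.keys
  let binLists := genBin key.length (2 ^ key.length) (List.replicate key.length 0)
  binLists.foldl (fun l i =>
    l ++ [number_of_true_clauses (assignment_of_list key i) formula]) []

-- ===== PORT B =====
def alt_var (lit : String) : String :=
  if PySem.Str.pyGet? lit 0 = some '-' then PySem.Str.slice lit (some 1) none else lit

def alt_collect (formula : List (List String)) : PySem.Set String × List String :=
  formula.foldl (fun p clause =>
    clause.foldl (fun (p : PySem.Set String × List String) lit =>
      let v := alt_var lit
      if PySem.Set.contains p.1 v then p
      else (PySem.Set.add p.1 v, p.2 ++ [v])) p) (PySem.Set.empty, [])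

def alt_bitdict (vars_order : List String) : PySem.Dict String Nat :=
  (List.range vars_order.length).foldl (fun d j =>
    d.insert (vars_order.getD (vars_order.length - 1 - j) "") ((1 : Nat) <<< j)) PySem.Dict.empty

def alt_compile (bit : PySem.Dict String Nat) (clause : List String) : Nat × Nat :=
  clause.foldl (fun pn lit =>
    if PySem.Str.pyGet? lit 0 = some '-' then
      (pn.1, pn.2 ||| bit.getD (PySem.Str.slice lit (some 1) none) 0)
    else
      (pn.1 ||| bit.getD lit 0, pn.2)) (0, 0)

def alt_count (compiled : List (Nat × Nat)) (full m : Nat) : Int :=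
  compiled.foldl (fun cnt pn =>
    if m &&& pn.1 ≠ 0 ∨ (full ^^^ m) &&& pn.2 ≠ 0 then cnt + 1 else cnt) 0

def evaluate_all_assignments_alt (formula : List (List String)) : List Int :=
  let vars_order := (alt_collect formula).2
  let n := vars_order.length
  let bit := alt_bitdict vars_order
  let compiled := formula.foldl (fun acc clause => acc ++ [alt_compile bit clause]) []
  let full := (1 <<< n) - 1
  (List.range (1 <<< n)).foldl (fun out m => out ++ [alt_count compiled full m]) []


-- ===== PRECONDITION & SPEC =====
-- Pre_ excludes formulas containing an empty literal string, on which Python's A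
-- (literal[0]) raises IndexError (B raises the same way there).
def Pre_evaluate_all_assignments (formula : List (List String)) : Prop :=
  ∀ clause ∈ formula, ∀ lit ∈ clause, lit ≠ ""
instance (formula : List (List String)) : Decidable (Pre_evaluate_all_assignments formula) := by
  unfold Pre_evaluate_all_assignments; infer_instance

def pvWitness_evaluate_all_assignments : List (List String) := [["a", "-b"], ["b"]]

def Spec_evaluate_all_assignments (formula : List (List String)) (out : List Int) : Prop := out = evaluate_all_assignments_alt formula
instance (formula : List (List String)) (out : List Int) : Decidable (Spec_evaluate_all_assignments formula out) := by unfold Spec_evaluate_all_assignments; infer_instance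

-- ===== CLAIM (what is proved, stated in full; the proofs are below) =====
def Claim_equal_evaluate_all_assignments : Prop := ∀ (formula : List (List String)), Dom_evaluate_all_assignments formula → Pre_evaluate_all_assignments formula → Spec_evaluate_all_assignments formula (evaluate_all_assignments formula)

-- ===== LEMMAS AND PROOFS =====


-- bits of m, least significant first / most significant first
def lbits : Nat → Nat → List Nat
  | 0, _ => []
  | n+1, m => (m % 2) :: lbits n (m / 2)

def mbits (n m : Nat) : List Nat := (lbits n m).reverse

theorem length_lbits (n m : Nat) : (lbits n m).length = n := by
  induction n generalizing m with
  | zero => rfl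
  | succ n ih => simp [lbits, ih]

theorem lbits_zero (n : Nat) : lbits n 0 = List.replicate n 0 := by
  induction n with
  | zero => rfl
  | succ n ih => simp [lbits, ih, List.replicate_succ]

theorem lbits_all_ones (n : Nat) : lbits n (2^n - 1) = List.replicate n 1 := by
  induction n with
  | zero => rfl
  | succ n ih =>
    have h2 : 2^(n+1) = 2 * 2^n := by ring
    have hp : 0 < 2^n := Nat.two_pow_pos n
    have h1 : (2^(n+1) - 1) % 2 = 1 := by omega
    have h2' : (2^(n+1) - 1) / 2 = 2^n - 1 := by omega
    simp [lbits, h1, h2', ih, List.replicate_succ]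

theorem lbits_ones_iff (n m : Nat) (hm : m < 2^n) :
    lbits n m = List.replicate n 1 ↔ m = 2^n - 1 := by
  constructor
  · intro h
    induction n generalizing m with
    | zero => simp at hm ⊢; omega
    | succ n ih =>
      have h2 : 2^(n+1) = 2 * 2^n := by ring
      simp [lbits, List.replicate_succ] at h
      have := ih (m / 2) (by omega) h.2
      omega
  · rintro rfl; exact lbits_all_ones n

theorem incrRev_lbits (n m : Nat) (hm : m + 1 < 2^n) :
    incrRev (lbits n m) = lbits n (m + 1) := by
  induction n generalizing m with
  | zero => simp at hm
  | succ n ih =>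
    have h2 : 2^(n+1) = 2 * 2^n := by ring
    rcases Nat.mod_two_eq_zero_or_one m with h | h
    · have h1 : (m+1) % 2 = 1 := by omega
      have hd : (m+1) / 2 = m / 2 := by omega
      simp [lbits, h, h1, hd, incrRev]
    · have h1 : (m+1) % 2 = 0 := by omega
      have hd : (m+1) / 2 = m / 2 + 1 := by omega
      have hb : m / 2 + 1 < 2^n := by omega
      simp [lbits, h, h1, hd, incrRev, ih _ hb]

theorem incr_mbits (n m : Nat) (hm : m + 1 < 2^n) :
    incr (mbits n m) = mbits n (m + 1) := by
  simp [incr, mbits, incrRev_lbits n m hm]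

theorem mbits_ones_iff (n m : Nat) (hm : m < 2^n) :
    mbits n m = List.replicate n 1 ↔ m = 2^n - 1 := by
  rw [mbits, List.reverse_eq_iff, List.reverse_replicate, lbits_ones_iff n m hm]

theorem genBin_eq (n : Nat) : ∀ (fuel m : Nat), m < 2^n → 2^n - 1 - m ≤ fuel →
    genBin n fuel (mbits n m) = (List.range (2^n - m)).map (fun k => mbits n (m + k)) := by
  intro fuel
  induction fuel with
  | zero =>
    intro m hm hf
    have : m = 2^n - 1 := by omega
    subst this
    rw [genBin]
    simp [(mbits_ones_iff n _ hm).2 rfl]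
    have : 2^n - (2^n - 1) = 1 := by omega
    rw [this]
    simp [(mbits_ones_iff n _ hm).2 rfl]
  | succ f ih =>
    intro m hm hf
    rw [genBin]
    by_cases h : m = 2^n - 1
    · subst h
      simp [(mbits_ones_iff n _ hm).2 rfl]
      have : 2^n - (2^n - 1) = 1 := by omega
      rw [this]
      simp [(mbits_ones_iff n _ hm).2 rfl]
    · have hne : ¬ (mbits n m = List.replicate n 1) := by
        rw [mbits_ones_iff n m hm]; exact h
      simp only [hne, if_false]
      rw [incr_mbits n m (by omega)]
      rw [ih (m+1) (by omega) (by omega)]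
      have hr : 2^n - m = (2^n - (m+1)) + 1 := by omega
      rw [hr, List.range_succ_eq_map]
      simp only [List.map_cons, List.map_map, Nat.add_zero]
      congr 1
      apply List.map_congr_left
      intro k _
      simp only [Function.comp]
      congr 1
      omega

theorem genBin_all (n : Nat) :
    genBin n (2^n) (List.replicate n 0) = (List.range (2^n)).map (mbits n) := by
  have h0 : List.replicate n 0 = mbits n 0 := by
    rw [mbits, lbits_zero, List.reverse_replicate]
  have hp : 0 < 2^n := Nat.two_pow_pos n
  rw [h0, genBin_eq n (2^n) 0 hp (by omega)]
  simp

theorem lbits_getD (n m k : Nat) (hk : k < n) :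
    (lbits n m).getD k 0 = m / 2^k % 2 := by
  induction n generalizing m k with
  | zero => omega
  | succ n ih =>
    cases k with
    | zero => simp [lbits]
    | succ k =>
      simp only [lbits, List.getD_cons_succ]
      rw [ih (m/2) k (by omega)]
      rw [Nat.div_div_eq_div_mul]
      congr 2
      rw [pow_succ]
      ring

-- ===== variable collection =====

def vnameL (formula : List (List String)) : List String :=
  formula.flatMap (fun c => c.map variable_of_literal)

theorem alt_var_eq (lit : String) : alt_var lit = variable_of_literal lit := by
  rw [alt_var, variable_of_literal]
  split
  · rw [PySem.Str.slice, PySem.Str.slice, PySem.Str.len_eq]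
    congr 1
    rw [PySem.Chars.slice_eq_listSlice, PySem.Chars.slice_eq_listSlice]
    rw [PySem.List.slice_from lit.toList (a := 1) (by norm_num)]
    rw [PySem.List.slice_toNat lit.toList (a := 1) (b := (lit.toList.length : Int))
        (by norm_num) (by exact_mod_cast Int.natCast_nonneg _)]
    rw [List.take_of_length_le (by simp)]
  · rfl

theorem litfold_eq (formula : List (List String)) :
    formula.foldl (fun acc clause =>
      clause.foldl (fun acc2 lit => acc2 ++ [variable_of_literal lit]) acc) []
    = vnameL formula := by
  have h1 := PySem.List.foldl_congr_mem
      (l := formula) (init := ([] : List String))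
      (f := fun acc clause => clause.foldl (fun acc2 lit => acc2 ++ [variable_of_literal lit]) acc)
      (g := fun acc clause => acc ++ clause.map variable_of_literal)
      (by intro acc c _; dsimp only; rw [PySem.List.foldl_append_singleton_eq_map])
  rw [h1, PySem.List.foldl_append_eq_flatMap]
  simp [vnameL]

theorem keys_cdfv (vs : List String) :
    (construct_dictionary_from_vars vs).keys = PySem.Set.ofList vs := by
  rw [construct_dictionary_from_vars]
  rw [PySem.Dict.keys_foldl_insert vs (fun _ _ => none) PySem.Dict.empty]
  simp [PySem.Dict.keys_empty, PySem.Set.update_nil_left]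

theorem collect_clause (clause : List String) : ∀ (s : PySem.Set String),
    clause.foldl (fun (p : PySem.Set String × List String) lit =>
      let v := alt_var lit
      if PySem.Set.contains p.1 v then p
      else (PySem.Set.add p.1 v, p.2 ++ [v])) (s, s)
    = (PySem.Set.update s (clause.map alt_var), PySem.Set.update s (clause.map alt_var)) := by
  induction clause with
  | nil => intro s; simp [PySem.Set.update_nil]
  | cons lit rest ih =>
    intro s
    simp only [List.foldl_cons, List.map_cons, PySem.Set.update_cons]
    by_cases h : PySem.Set.contains s (alt_var lit) = true
    · have hmem : alt_var lit ∈ s := (PySem.Set.contains_iff _ _).1 h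
      simp only [h, if_true]
      rw [PySem.Set.add_of_mem hmem]
      exact ih s
    · have hnm : alt_var lit ∉ s := fun hm => h ((PySem.Set.contains_iff _ _).2 hm)
      simp only [h]
      have hadd : PySem.Set.add s (alt_var lit) = s ++ [alt_var lit] := PySem.Set.add_of_not_mem hnm
      rw [hadd]
      exact ih (s ++ [alt_var lit])

theorem collect_formula (F : List (List String)) : ∀ (s : PySem.Set String),
    F.foldl (fun p clause =>
      clause.foldl (fun (p : PySem.Set String × List String) lit =>
        let v := alt_var lit
        if PySem.Set.contains p.1 v then p
        else (PySem.Set.add p.1 v, p.2 ++ [v])) p) (s, s)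
    = (PySem.Set.update s (F.flatMap (fun c => c.map alt_var)),
       PySem.Set.update s (F.flatMap (fun c => c.map alt_var))) := by
  induction F with
  | nil => intro s; simp [PySem.Set.update_nil]
  | cons c F ih =>
    intro s
    simp only [List.foldl_cons, List.flatMap_cons]
    rw [collect_clause c s, ih (PySem.Set.update s (c.map alt_var))]
    rw [PySem.Set.update_append]

theorem alt_collect_snd (formula : List (List String)) :
    (alt_collect formula).2 = PySem.Set.ofList (vnameL formula) := by
  rw [alt_collect]
  have : (PySem.Set.empty : PySem.Set String) = ([] : List String) := rfl
  rw [this, collect_formula formula []]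
  have : (vnameL formula) = formula.flatMap (fun c => c.map alt_var) := by
    simp [vnameL, funext alt_var_eq]
  rw [this]
  rfl

-- ===== assignment dictionary lookups =====

theorem map_getD_range {α : Type} [Inhabited α] (xs : List α) (d : α) :
    (List.range xs.length).map (fun j => xs.getD j d) = xs := by
  apply List.ext_getElem
  · simp
  · intro i h1 h2
    simp only [List.getElem_map, List.getElem_range]
    rw [List.getD_eq_getElem xs d (by simpa using h2)]

theorem assignment_items (key : List String) (hnd : key.Nodup) (i : List Nat) :
    (assignment_of_list key i).items
    = (List.range key.length).map
        (fun j => (key.getD j "", if i.getD j 0 = 1 then true else false)) := by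
  rw [assignment_of_list]
  have h1 := PySem.List.foldl_congr_mem
      (l := List.range key.length) (init := (PySem.Dict.empty : PySem.Dict String Bool))
      (f := fun d j => if i.getD j 0 = 1 then d.insert (key.getD j "") true
            else d.insert (key.getD j "") false)
      (g := fun (d : PySem.Dict String Bool) j =>
        d.insert (key.getD j "") (if i.getD j 0 = 1 then true else false))
      (by intro d j _; dsimp only; split <;> rfl)
  rw [h1]
  rw [PySem.Dict.items_foldl_insert_fresh (k := fun j => key.getD j "")
        (v := fun j => if i.getD j 0 = 1 then true else false)
        (l := List.range key.length) (d := PySem.Dict.empty)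
        (by intro a _; exact PySem.Dict.contains_empty _)
        (by rw [map_getD_range key ""]; exact hnd)]
  show ([] : List (String × Bool)) ++ _ = _
  simp

theorem assignment_getD (key : List String) (hnd : key.Nodup) (i : List Nat)
    (j0 : Nat) (hj0 : j0 < key.length) :
    (assignment_of_list key i).getD (key[j0]) false
      = (if i.getD j0 0 = 1 then true else false) := by
  apply PySem.Dict.getD_of_mem_items
  · rw [assignment_items key hnd i]
    apply List.mem_map.2
    exact ⟨j0, by simp [hj0], by rw [List.getD_eq_getElem key "" hj0]⟩
  · rw [PySem.Dict.keys, assignment_items key hnd i]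
    simp only [List.map_map]
    have h2 : ((fun (p : String × Bool) => p.1) ∘ fun j => ((key.getD j "" : String), if i.getD j 0 = 1 then true else false))
        = fun j => key.getD j "" := by funext j; rfl
    rw [h2, map_getD_range key ""]
    exact hnd

-- ===== bitmask dictionary lookups =====

theorem bitdict_fst_map (V : List String) :
    (List.range V.length).map (fun j => V.getD (V.length - 1 - j) "") = V.reverse := by
  apply List.ext_getElem
  · simp
  · intro t h1 h2
    simp only [List.getElem_map, List.getElem_range, List.getElem_reverse]
    simp at h1
    rw [List.getD_eq_getElem V "" (by omega)]

theorem bitdict_items (V : List String) (hnd : V.Nodup) :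
    (alt_bitdict V).items
    = (List.range V.length).map (fun j => (V.getD (V.length - 1 - j) "", (1 : Nat) <<< j)) := by
  rw [alt_bitdict]
  rw [PySem.Dict.items_foldl_insert_fresh (k := fun j => V.getD (V.length - 1 - j) "")
        (v := fun j => (1 : Nat) <<< j)
        (l := List.range V.length) (d := PySem.Dict.empty)
        (by intro a _; exact PySem.Dict.contains_empty _)
        (by rw [bitdict_fst_map]; exact List.nodup_reverse.2 hnd)]
  show ([] : List (String × Nat)) ++ _ = _
  simp

theorem bitdict_keys_nodup (V : List String) (hnd : V.Nodup) :
    (alt_bitdict V).keys.Nodup := by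
  rw [PySem.Dict.keys, bitdict_items V hnd]
  simp only [List.map_map]
  have h2 : ((fun (p : String × Nat) => p.1) ∘ fun j => ((V.getD (V.length - 1 - j) "" : String), (1:Nat) <<< j))
      = fun j => V.getD (V.length - 1 - j) "" := by funext j; rfl
  rw [h2, bitdict_fst_map]
  exact List.nodup_reverse.2 hnd

theorem bitdict_getD (V : List String) (hnd : V.Nodup) (j0 : Nat) (hj0 : j0 < V.length) :
    (alt_bitdict V).getD (V[j0]) 0 = 2 ^ (V.length - 1 - j0) := by
  have h1 : (V[j0], (1:Nat) <<< (V.length - 1 - j0)) ∈ (alt_bitdict V).items := by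
    rw [bitdict_items V hnd]
    apply List.mem_map.2
    refine ⟨V.length - 1 - j0, by simp; omega, ?_⟩
    have he : V.length - 1 - (V.length - 1 - j0) = j0 := by omega
    rw [he, List.getD_eq_getElem V "" hj0]
  rw [← Nat.one_shiftLeft]
  apply PySem.Dict.getD_of_mem_items
  · exact h1
  · exact bitdict_keys_nodup V hnd

-- ===== per-variable lookups in terms of bits of m =====

theorem lookup_eq (V : List String) (hnd : V.Nodup) (m : Nat) (v : String) (hv : v ∈ V) :
    (assignment_of_list V (mbits V.length m)).getD v false
      = Nat.testBit m (V.length - 1 - V.idxOf v) := by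
  have hj0 : V.idxOf v < V.length := List.idxOf_lt_length_of_mem hv
  have hgv : V[V.idxOf v] = v := List.getElem_idxOf hj0
  rw [← hgv, assignment_getD V hnd _ _ hj0]
  have hlen : (lbits V.length m).length = V.length := length_lbits _ _
  have hmb : (mbits V.length m).getD (V.idxOf v) 0
      = (lbits V.length m).getD (V.length - 1 - V.idxOf v) 0 := by
    rw [mbits, List.getD_eq_getElem _ _ (by simp [hlen, hj0]),
        List.getD_eq_getElem _ _ (by omega), List.getElem_reverse]
    congr 1
    omega
  rw [hmb, lbits_getD _ _ _ (by omega), Nat.testBit_eq_decide_div_mod_eq]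
  simp

theorem bit_lookup_eq (V : List String) (hnd : V.Nodup) (v : String) (hv : v ∈ V) :
    (alt_bitdict V).getD v 0 = 2 ^ (V.length - 1 - V.idxOf v) := by
  have hj0 : V.idxOf v < V.length := List.idxOf_lt_length_of_mem hv
  have hgv : V[V.idxOf v] = v := List.getElem_idxOf hj0
  have h := bitdict_getD V hnd (V.idxOf v) hj0
  rw [hgv] at h
  exact h

-- ===== bitwise facts =====

theorem or_eq_zero_iff' (a b : Nat) : a ||| b = 0 ↔ a = 0 ∧ b = 0 := by
  constructor
  · intro h
    have h2 : ∀ i, (a ||| b).testBit i = false := by simp [h]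
    simp only [Nat.testBit_or, Bool.or_eq_false_iff] at h2
    constructor <;> (apply Nat.eq_of_testBit_eq; intro i; simp [(h2 i).1, (h2 i).2])
  · rintro ⟨rfl, rfl⟩; simp

theorem ne_zero_iff_exists_testBit (x : Nat) : x ≠ 0 ↔ ∃ i, x.testBit i := by
  constructor
  · intro h
    by_contra hc
    exact h (Nat.eq_of_testBit_eq (fun i => by
      simp only [Nat.zero_testBit]
      exact Bool.eq_false_iff.2 (fun ht => hc ⟨i, ht⟩)))
  · rintro ⟨i, hi⟩ rfl
    simp at hi

theorem and_two_pow_ne_zero (m k : Nat) : m &&& 2^k ≠ 0 ↔ m.testBit k := by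
  rw [ne_zero_iff_exists_testBit]
  simp only [Nat.testBit_and, Nat.testBit_two_pow, Bool.and_eq_true, decide_eq_true_eq]
  constructor
  · rintro ⟨i, hi, rfl⟩; exact hi
  · intro h; exact ⟨k, h, rfl⟩

theorem and_or_ne_zero (m x y : Nat) : m &&& (x ||| y) ≠ 0 ↔ (m &&& x ≠ 0 ∨ m &&& y ≠ 0) := by
  rw [Nat.and_or_distrib_left, Ne, or_eq_zero_iff']
  tauto

theorem notm_testBit (n m k : Nat) (hk : k < n) :
    ((2^n - 1) ^^^ m).testBit k = !m.testBit k := by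
  rw [Nat.testBit_xor, Nat.testBit_two_pow_sub_one]
  simp [hk]

-- ===== clause evaluation: masks vs dictionary =====

theorem clause_step (V : List String) (hnd : V.Nodup) (m : Nat) :
    ∀ (clause : List String), (∀ lit ∈ clause, variable_of_literal lit ∈ V) →
    ∀ pn : Nat × Nat,
    (decide (m &&& (clause.foldl (fun pn lit =>
        if PySem.Str.pyGet? lit 0 = some '-' then
          (pn.1, pn.2 ||| (alt_bitdict V).getD (PySem.Str.slice lit (some 1) none) 0)
        else
          (pn.1 ||| (alt_bitdict V).getD lit 0, pn.2)) pn).1 ≠ 0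
      ∨ ((2 ^ V.length - 1) ^^^ m) &&& (clause.foldl (fun pn lit =>
        if PySem.Str.pyGet? lit 0 = some '-' then
          (pn.1, pn.2 ||| (alt_bitdict V).getD (PySem.Str.slice lit (some 1) none) 0)
        else
          (pn.1 ||| (alt_bitdict V).getD lit 0, pn.2)) pn).2 ≠ 0))
    = (decide (m &&& pn.1 ≠ 0 ∨ ((2 ^ V.length - 1) ^^^ m) &&& pn.2 ≠ 0)
       || clause.any (fun lit =>
            boolean_value_of_literal (assignment_of_list V (mbits V.length m)) lit)) := by
  intro clause
  induction clause with
  | nil => intro _ pn; simp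
  | cons lit rest ih =>
    intro hmem pn
    have hvmem : variable_of_literal lit ∈ V := hmem lit (List.mem_cons_self)
    have hrest : ∀ l ∈ rest, variable_of_literal l ∈ V :=
      fun l hl => hmem l (List.mem_cons_of_mem _ hl)
    have hj0 : V.idxOf (variable_of_literal lit) < V.length :=
      List.idxOf_lt_length_of_mem hvmem
    have hn : 0 < V.length := by omega
    set k := V.length - 1 - V.idxOf (variable_of_literal lit) with hk
    have hkn : k < V.length := by omega
    simp only [List.foldl_cons, List.any_cons]
    by_cases hneg : PySem.Str.pyGet? lit 0 = some '-'
    · -- negative literal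
      have hvar : PySem.Str.slice lit (some 1) none = variable_of_literal lit := by
        have := alt_var_eq lit
        rw [alt_var, if_pos hneg] at this
        exact this
      simp only [hneg, if_pos, hvar]
      rw [ih hrest]
      have hbvl : boolean_value_of_literal (assignment_of_list V (mbits V.length m)) lit
          = decide (((2 ^ V.length - 1) ^^^ m) &&& 2 ^ k ≠ 0) := by
        rw [boolean_value_of_literal, if_pos hneg,
            lookup_eq V hnd m _ hvmem, ← hk, ← notm_testBit V.length m k hkn]
        simp [and_two_pow_ne_zero, Nat.testBit_xor, Nat.testBit_two_pow_sub_one, hkn]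
      rw [hbvl, bit_lookup_eq V hnd _ hvmem, ← hk]
      have hsplit : ((2 ^ V.length - 1) ^^^ m) &&& (pn.2 ||| 2 ^ k) ≠ 0
          ↔ (((2 ^ V.length - 1) ^^^ m) &&& pn.2 ≠ 0
             ∨ ((2 ^ V.length - 1) ^^^ m) &&& 2 ^ k ≠ 0) := and_or_ne_zero _ _ _
      rw [← Bool.or_assoc]
      rw [show (decide (m &&& pn.1 ≠ 0 ∨ ((2 ^ V.length - 1) ^^^ m) &&& pn.2 ≠ 0)
            || decide (((2 ^ V.length - 1) ^^^ m) &&& 2 ^ k ≠ 0))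
          = decide ((m &&& pn.1 ≠ 0 ∨ ((2 ^ V.length - 1) ^^^ m) &&& pn.2 ≠ 0)
            ∨ ((2 ^ V.length - 1) ^^^ m) &&& 2 ^ k ≠ 0) from (Bool.decide_or _ _).symm]
      congr 1
      rw [decide_eq_decide]
      rw [hsplit]
      tauto
    · -- positive literal
      have hvar : variable_of_literal lit = lit := by
        rw [variable_of_literal, if_neg hneg]
      simp only [hneg, if_false]
      rw [ih hrest]
      have hbvl : boolean_value_of_literal (assignment_of_list V (mbits V.length m)) lit
          = decide (m &&& 2 ^ k ≠ 0) := by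
        rw [boolean_value_of_literal, if_neg hneg,
            lookup_eq V hnd m _ hvmem, ← hk]
        simp [and_two_pow_ne_zero]
      rw [hbvl]
      have hbit : (alt_bitdict V).getD lit 0 = 2 ^ k := by
        rw [← hvar, bit_lookup_eq V hnd _ hvmem, ← hk]
      rw [hbit]
      have hsplit : m &&& (pn.1 ||| 2 ^ k) ≠ 0
          ↔ (m &&& pn.1 ≠ 0 ∨ m &&& 2 ^ k ≠ 0) := and_or_ne_zero _ _ _
      rw [← Bool.or_assoc]
      rw [show (decide (m &&& pn.1 ≠ 0 ∨ ((2 ^ V.length - 1) ^^^ m) &&& pn.2 ≠ 0)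
            || decide (m &&& 2 ^ k ≠ 0))
          = decide ((m &&& pn.1 ≠ 0 ∨ ((2 ^ V.length - 1) ^^^ m) &&& pn.2 ≠ 0)
            ∨ m &&& 2 ^ k ≠ 0) from (Bool.decide_or _ _).symm]
      congr 1
      rw [decide_eq_decide]
      rw [hsplit]
      tauto

theorem count_eq (formula : List (List String)) (V : List String) (hnd : V.Nodup)
    (hmem : ∀ clause ∈ formula, ∀ lit ∈ clause, variable_of_literal lit ∈ V) (m : Nat) :
    alt_count (formula.map (alt_compile (alt_bitdict V))) (2 ^ V.length - 1) m
    = number_of_true_clauses (assignment_of_list V (mbits V.length m)) formula := by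
  rw [alt_count, number_of_true_clauses, List.foldl_map]
  apply PySem.List.foldl_congr_mem
  intro cnt c hc
  dsimp only
  have h := clause_step V hnd m c (hmem c hc) (0, 0)
  have h0 : decide (m &&& (0, 0).1 ≠ 0 ∨ ((2 ^ V.length - 1) ^^^ m) &&& ((0:Nat), (0:Nat)).2 ≠ 0)
      = false := by simp
  rw [h0, Bool.false_or] at h
  rw [alt_compile]
  have hiff : (m &&& (c.foldl (fun pn lit =>
        if PySem.Str.pyGet? lit 0 = some '-' then
          (pn.1, pn.2 ||| (alt_bitdict V).getD (PySem.Str.slice lit (some 1) none) 0)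
        else
          (pn.1 ||| (alt_bitdict V).getD lit 0, pn.2)) (0, 0)).1 ≠ 0
      ∨ ((2 ^ V.length - 1) ^^^ m) &&& (c.foldl (fun pn lit =>
        if PySem.Str.pyGet? lit 0 = some '-' then
          (pn.1, pn.2 ||| (alt_bitdict V).getD (PySem.Str.slice lit (some 1) none) 0)
        else
          (pn.1 ||| (alt_bitdict V).getD lit 0, pn.2)) (0, 0)).2 ≠ 0)
      ↔ (boolean_value_of_clause (assignment_of_list V (mbits V.length m)) c = true) := by
    rw [boolean_value_of_clause, ← h, decide_eq_true_eq]
  exact if_congr hiff rfl rfl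

-- ===== assembly =====

theorem ports_eq (formula : List (List String)) :
    evaluate_all_assignments formula = evaluate_all_assignments_alt formula := by
  rw [evaluate_all_assignments, evaluate_all_assignments_alt]
  simp only [litfold_eq, keys_cdfv, alt_collect_snd]
  set V := PySem.Set.ofList (vnameL formula) with hV
  have hnd : V.Nodup := PySem.Set.nodup_ofList _
  have hmem : ∀ clause ∈ formula, ∀ lit ∈ clause, variable_of_literal lit ∈ V := by
    intro c hc lit hl
    rw [hV]
    apply (PySem.Set.mem_ofList _ _).2
    rw [vnameL]
    exact List.mem_flatMap.2 ⟨c, hc, List.mem_map.2 ⟨lit, hl, rfl⟩⟩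
  rw [genBin_all V.length]
  rw [PySem.List.foldl_append_singleton_eq_map, PySem.List.foldl_append_singleton_eq_map,
      PySem.List.foldl_append_singleton_eq_map]
  rw [Nat.one_shiftLeft]
  simp only [List.nil_append, List.map_map]
  apply List.map_congr_left
  intro m _
  simp only [Function.comp]
  rw [← count_eq formula V hnd hmem m]

-- ===== VERDICT (by name: the statement is the Claim_ definition above) =====
theorem evaluate_all_assignments_spec : Claim_equal_evaluate_all_assignments := by
  intro formula _ _
  unfold Spec_evaluate_all_assignments
  exact ports_eq formula
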